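-- pv_equiv track=rewrite | github.com/Dan-Mihaylov/Software-Uni-Courses | Python OOP/First Steps In OOP/01_rhombus_of_stars.py | print_rhombus
-- ===== SOURCE A (Python) =====
-- def print_rhombus(num: int):
--     res = []
--
--     for row in range(1, num + 1):
--         if row == 1:
--             res.append((num - row) * " " + row * "*")
--         else:
--             res.append((num - row) * " " + row * "* ")
--     for rows in range(0, num - 1):
--         if rows == 0:
--             res.append((num - (row - 1)) * " " + (num - 1) * "* ")
--         else:
--             res.append((rows + 1) * " " + (num - rows - 1) * "* ")
--
--     return "\n".join(res)
-- ===== SOURCE B (Python) =====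
-- def print_rhombus(num: int):
--     lines = []
--     for i in range(0, 2 * num - 1):
--         width = num - abs(num - 1 - i)
--         stars = "*" if i == 0 else width * "* "
--         lines.append((num - width) * " " + stars)
--     return "\n".join(lines)
-- ===== Notes on version B (the rewrite author's own statement) =====
-- stated objective: simpler
-- what changed: Replaces A's two separate index-arithmetic loops (the second reading the leaked loop variable of the first) by one symmetric pass over the line index with a width formula num - abs(num-1-i), joined at the end.
import Mathlib
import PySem

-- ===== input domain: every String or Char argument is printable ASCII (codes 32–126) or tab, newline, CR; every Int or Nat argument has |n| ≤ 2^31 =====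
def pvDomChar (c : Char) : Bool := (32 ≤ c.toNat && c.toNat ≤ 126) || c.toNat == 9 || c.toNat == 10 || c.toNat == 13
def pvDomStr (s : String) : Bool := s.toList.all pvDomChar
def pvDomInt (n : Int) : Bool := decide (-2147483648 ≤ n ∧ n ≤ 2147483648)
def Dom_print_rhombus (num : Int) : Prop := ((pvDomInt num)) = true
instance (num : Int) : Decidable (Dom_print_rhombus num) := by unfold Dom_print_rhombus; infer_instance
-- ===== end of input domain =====

-- B replaces A's two separate loops (and the leaked loop variable) by one symmetric pass
-- over the line index with a width formula; objective: simpler.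

-- string repetition 's * n' on the character list (Python: '' for n ≤ 0)
def pvRep (s : List Char) (n : Int) : List Char := PySem.List.pyRepeat s n

-- ===== PORT A =====
-- state of the first loop: (res, row); row keeps its last value after the loop
-- (Python leaves 'row' undefined when the loop never runs; that value is never
--  read then, because the second loop is empty too — 0 is an arbitrary initial)
def print_rhombus (num : Int) : String :=
  let st := (PySem.List.pyRange 1 (num + 1) 1).foldl
    (fun (st : List String × Int) row =>
      if row = 1 then
        (st.1 ++ [String.ofList (pvRep [' '] (num - row) ++ pvRep ['*'] row)], row)
      else
        (st.1 ++ [String.ofList (pvRep [' '] (num - row) ++ pvRep ['*', ' '] row)], row))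
    ([], 0)
  let row := st.2
  let res := (PySem.List.pyRange 0 (num - 1) 1).foldl
    (fun res rows =>
      if rows = 0 then
        res ++ [String.ofList (pvRep [' '] (num - (row - 1)) ++ pvRep ['*', ' '] (num - 1))]
      else
        res ++ [String.ofList (pvRep [' '] (rows + 1) ++ pvRep ['*', ' '] (num - rows - 1))])
    st.1
  PySem.Str.join "\n" res

-- ===== PORT B =====
def print_rhombus_alt (num : Int) : String :=
  let lines := (PySem.List.pyRange 0 (2 * num - 1) 1).map (fun i =>
    let width := num - |num - 1 - i|
    let stars := if i = 0 then ['*'] else pvRep ['*', ' '] width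
    String.ofList (pvRep [' '] (num - width) ++ stars))
  PySem.Str.join "\n" lines

-- ===== PRECONDITION & SPEC =====
def Spec_print_rhombus (num : Int) (out : String) : Prop := out = print_rhombus_alt num
instance (num : Int) (out : String) : Decidable (Spec_print_rhombus num out) := by unfold Spec_print_rhombus; infer_instance

-- ===== CLAIM (what is proved, stated in full; the proofs are below) =====
def Claim_equal_print_rhombus : Prop := ∀ (num : Int), Dom_print_rhombus num → Spec_print_rhombus num (print_rhombus num)

-- ===== LEMMAS AND PROOFS =====

-- an 'if/else with an append in each branch' fold is a map
theorem pv_foldl_append_if_else {a b : Type} (p : a -> Prop) [DecidablePred p]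
    (f g : a -> b) (l : List a) (acc : List b) :
    l.foldl (fun acc x => if p x then acc ++ [f x] else acc ++ [g x]) acc
      = acc ++ l.map (fun x => if p x then f x else g x) := by
  induction l generalizing acc with
  | nil => simp
  | cons y t ih => by_cases h : p y <;> simp [h, ih]

-- A's first loop, with its paired (res, row) state, is an append-map plus a 'last value' fold
theorem pv_pairfold (l : List Int) (f : Int -> String) (res : List String) (r0 : Int) :
    l.foldl (fun (st : List String × Int) row => (st.1 ++ [f row], row)) (res, r0)
      = (res ++ l.map f, l.foldl (fun (_ : Int) x => x) r0) := by
  induction l generalizing res r0 with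
  | nil => simp
  | cons a t ih => simp [ih]

-- after a nonempty first loop, row = num
theorem pv_row_final (num : Int) (h : 1 <= num) :
    (PySem.List.pyRange 1 (num + 1) 1).foldl (fun (_ : Int) x => x) 0 = num := by
  rw [PySem.List.pyRange_one_succ_right h]
  simp [List.foldl_append]

-- B's single line list equals A's two line lists concatenated (row already replaced by num)
theorem pv_lists_eq (num : Int) :
    (PySem.List.pyRange 0 (2 * num - 1) 1).map (fun i =>
      let width := num - |num - 1 - i|
      let stars := if i = 0 then ['*'] else pvRep ['*', ' '] width
      String.ofList (pvRep [' '] (num - width) ++ stars))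
    = ((PySem.List.pyRange 1 (num + 1) 1).map (fun row =>
        if row = 1 then String.ofList (pvRep [' '] (num - row) ++ pvRep ['*'] row)
        else String.ofList (pvRep [' '] (num - row) ++ pvRep ['*', ' '] row)))
      ++ ((PySem.List.pyRange 0 (num - 1) 1).map (fun rows =>
        if rows = 0 then String.ofList (pvRep [' '] (num - (num - 1)) ++ pvRep ['*', ' '] (num - 1))
        else String.ofList (pvRep [' '] (rows + 1) ++ pvRep ['*', ' '] (num - rows - 1)))) := by
  by_cases hp : 1 ≤ num
  · rw [PySem.List.pyRange_one_append 0 num (2 * num - 1) (by omega) (by omega)]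
    rw [List.map_append]
    congr 1
    · -- ascending part: line i = 0 + k of B  vs  row = 1 + k of A's first loop
      rw [PySem.List.pyRange_one 0 num, PySem.List.pyRange_one 1 (num + 1)]
      have hlen : (num - 0).toNat = (num + 1 - 1).toNat := by omega
      rw [hlen, List.map_map, List.map_map]
      apply List.map_congr_left
      intro k hk
      have hk' : (k : Int) < num := by
        have := List.mem_range.mp hk; omega
      show String.ofList (pvRep [' '] (num - (num - |num - 1 - ((0:Int) + (k:Int))|)) ++
             (if (0:Int) + (k:Int) = 0 then ['*']
              else pvRep ['*', ' '] (num - |num - 1 - ((0:Int) + (k:Int))|)))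
         = if (1:Int) + (k:Int) = 1 then
             String.ofList (pvRep [' '] (num - ((1:Int) + k)) ++ pvRep ['*'] ((1:Int) + k))
           else
             String.ofList (pvRep [' '] (num - ((1:Int) + k)) ++ pvRep ['*', ' '] ((1:Int) + k))
      have hw : |num - 1 - ((0:Int) + (k:Int))| = num - 1 - ((0:Int) + (k:Int)) :=
        abs_of_nonneg (by omega)
      rw [hw]
      by_cases h0 : ((k:Nat) : Int) = 0
      · rw [if_pos (by omega : (0:Int) + (k:Int) = 0), if_pos (by omega : (1:Int) + (k:Int) = 1)]
        have e1 : num - (num - (num - 1 - ((0:Int) + (k:Int)))) = num - ((1:Int) + k) := by omega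
        have e2 : pvRep ['*'] ((1:Int) + (k:Int)) = ['*'] := by rw [h0]; decide
        rw [e1, e2]
      · rw [if_neg (by omega : ¬ ((0:Int) + (k:Int) = 0)),
            if_neg (by omega : ¬ ((1:Int) + (k:Int) = 1))]
        have e1 : num - (num - (num - 1 - ((0:Int) + (k:Int)))) = num - ((1:Int) + k) := by omega
        have e2 : num - (num - 1 - ((0:Int) + (k:Int))) = (1:Int) + k := by omega
        rw [e1, e2]
    · -- descending part: line i = num + k of B  vs  rows = 0 + k of A's second loop
      rw [PySem.List.pyRange_one num (2 * num - 1), PySem.List.pyRange_one 0 (num - 1)]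
      have hlen : (2 * num - 1 - num).toNat = (num - 1 - 0).toNat := by omega
      rw [hlen, List.map_map, List.map_map]
      apply List.map_congr_left
      intro k hk
      have hk' : (k : Int) < num - 1 := by
        have := List.mem_range.mp hk; omega
      show String.ofList (pvRep [' '] (num - (num - |num - 1 - (num + (k:Int))|)) ++
             (if num + (k:Int) = 0 then ['*']
              else pvRep ['*', ' '] (num - |num - 1 - (num + (k:Int))|)))
         = if (0:Int) + (k:Int) = 0 then
             String.ofList (pvRep [' '] (num - (num - 1)) ++ pvRep ['*', ' '] (num - 1))
           else
             String.ofList (pvRep [' '] (((0:Int) + k) + 1) ++ pvRep ['*', ' '] (num - ((0:Int) + k) - 1))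
      have hw : |num - 1 - (num + (k:Int))| = (k:Int) + 1 := by
        rw [abs_of_nonpos (by omega)]; omega
      rw [hw]
      by_cases h0 : ((k:Nat) : Int) = 0
      · rw [if_neg (by omega : ¬ (num + (k:Int) = 0)), if_pos (by omega : (0:Int) + (k:Int) = 0)]
        have e1 : num - (num - ((k:Int) + 1)) = num - (num - 1) := by omega
        have e2 : num - ((k:Int) + 1) = num - 1 := by omega
        rw [e1, e2]
      · rw [if_neg (by omega : ¬ (num + (k:Int) = 0)),
            if_neg (by omega : ¬ ((0:Int) + (k:Int) = 0))]
        have e1 : num - (num - ((k:Int) + 1)) = ((0:Int) + k) + 1 := by omega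
        have e2 : num - ((k:Int) + 1) = num - ((0:Int) + k) - 1 := by omega
        rw [e1, e2]
  · -- num ≤ 0 : all three ranges are empty
    rw [PySem.List.pyRange_one_eq_nil (by omega : (2 * num - 1 : Int) ≤ 0),
        PySem.List.pyRange_one_eq_nil (by omega : (num + 1 : Int) ≤ 1),
        PySem.List.pyRange_one_eq_nil (by omega : (num - 1 : Int) ≤ 0)]
    simp

-- ===== VERDICT (by name: the statement is the Claim_ definition above) =====
theorem print_rhombus_spec : Claim_equal_print_rhombus := by
  intro num _
  unfold Spec_print_rhombus print_rhombus print_rhombus_alt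
  have hfun : (fun (st : List String × Int) row =>
      if row = 1 then
        (st.1 ++ [String.ofList (pvRep [' '] (num - row) ++ pvRep ['*'] row)], row)
      else
        (st.1 ++ [String.ofList (pvRep [' '] (num - row) ++ pvRep ['*', ' '] row)], row))
    = fun (st : List String × Int) row =>
        (st.1 ++ [if row = 1 then String.ofList (pvRep [' '] (num - row) ++ pvRep ['*'] row)
                  else String.ofList (pvRep [' '] (num - row) ++ pvRep ['*', ' '] row)], row) := by
    funext st row; split_ifs <;> rfl
  dsimp only
  rw [hfun, pv_pairfold]
  dsimp only
  rw [pv_foldl_append_if_else (fun (rows : Int) => rows = 0)]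
  by_cases h1 : 1 ≤ num
  · rw [pv_row_final num h1]
    rw [List.nil_append]
    exact (congrArg (PySem.Str.join "\n") (pv_lists_eq num)).symm
  · rw [PySem.List.pyRange_one_eq_nil (by omega : (2 * num - 1 : Int) ≤ 0),
        PySem.List.pyRange_one_eq_nil (by omega : (num + 1 : Int) ≤ 1),
        PySem.List.pyRange_one_eq_nil (by omega : (num - 1 : Int) ≤ 0)]
    simp
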